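-- pv_equiv track=rewrite | github.com/denson/hypergraph_code_explorer | src/hypergraph_code_explorer/analyze.py | _is_test_path
-- ===== SOURCE A (Python) =====
-- def _is_test_path(path: str) -> bool:
--     """Detect test file paths."""
--     normalized = path.replace("\\", "/").lower()
--     parts = normalized.rstrip("/").split("/")
--     for part in parts:
--         if part in ("tests", "test", "testing"):
--             return True
--         if part.startswith("test_") or part.endswith("_test"):
--             return True
--     basename = parts[-1] if parts else ""
--     if basename.startswith("test_") or basename.endswith("_test.py"):
--         return True
--     if basename == "conftest.py":
--         return True
--     return False
-- ===== SOURCE B (Python) =====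
-- def _is_test_path(path: str) -> bool:
--     """Detect test file paths (substring tests on the sentinel-delimited normalized path)."""
--     n = path.replace("\\", "/").lower().rstrip("/")
--     s = "/" + n + "/"
--     if "/tests/" in s or "/test/" in s or "/testing/" in s:
--         return True
--     if "/test_" in s or "_test/" in s:
--         return True
--     return s.endswith("_test.py/") or s.endswith("/conftest.py/")
-- ===== Notes on version B (the rewrite author's own statement) =====
-- stated objective: alternative
-- what changed: B replaces the split-into-segments-and-scan loop of A by a fixed set of substring and suffix tests on the slash-sentinel-wrapped normalized path, with segment boundaries encoded as slash characters inside the patterns.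
import Mathlib
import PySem

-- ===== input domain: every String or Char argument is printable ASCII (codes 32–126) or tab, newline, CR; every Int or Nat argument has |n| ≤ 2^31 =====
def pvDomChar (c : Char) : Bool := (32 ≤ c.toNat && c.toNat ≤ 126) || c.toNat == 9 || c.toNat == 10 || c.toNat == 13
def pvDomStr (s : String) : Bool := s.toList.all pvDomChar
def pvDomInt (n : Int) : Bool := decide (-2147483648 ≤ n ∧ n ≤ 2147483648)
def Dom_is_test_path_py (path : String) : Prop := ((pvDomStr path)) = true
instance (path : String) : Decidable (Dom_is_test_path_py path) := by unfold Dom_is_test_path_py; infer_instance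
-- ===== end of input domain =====

-- B replaces A's split-into-segments-and-scan loop by a fixed set of substring/suffix checks on the
-- slash-sentinel-wrapped normalized path (objective: alternative — no intermediate segment list).

-- hand port of Python's s.rstrip("/") (PySem.Chars has no one-sided strip-with-chars):
-- exact — drops exactly the maximal run of trailing '/' characters, mirroring Chars.stripChars's right half.
def pyRstripSlash (s : List Char) : List Char :=
  (s.reverse.dropWhile (fun c => (['/'] : List Char).contains c)).reverse

-- ===== PORT A =====
-- the 'for part in parts' loop with its two early returns
def is_test_path_loop : List (List Char) → Bool
  | [] => false
  | part :: rest =>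
    if part = "tests".toList ∨ part = "test".toList ∨ part = "testing".toList then true
    else if PySem.Chars.startswith part "test_".toList || PySem.Chars.endswith part "_test".toList then true
    else is_test_path_loop rest

-- everything after 'parts = …': the loop, then the basename checks
def pyATest (parts : List (List Char)) : Bool :=
  if is_test_path_loop parts then true
  else
    let basename := match parts.getLast? with | some b => b | none => ([] : List Char)  -- parts[-1] if parts else ""
    if PySem.Chars.startswith basename "test_".toList || PySem.Chars.endswith basename "_test.py".toList then true
    else if basename = "conftest.py".toList then true
    else false

def is_test_path_py (path : String) : Bool :=
  pyATest (PySem.Chars.splitOn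
    (pyRstripSlash (PySem.Chars.lower (PySem.Chars.replace path.toList "\\".toList "/".toList)))
    "/".toList)

-- ===== PORT B =====
-- the checks of Source B on s = "/" + n + "/"
def pyBChecks (s : List Char) : Bool :=
  if PySem.Chars.isIn "/tests/".toList s || PySem.Chars.isIn "/test/".toList s ||
     PySem.Chars.isIn "/testing/".toList s then true
  else if PySem.Chars.isIn "/test_".toList s || PySem.Chars.isIn "_test/".toList s then true
  else PySem.Chars.endswith s "_test.py/".toList || PySem.Chars.endswith s "/conftest.py/".toList

def is_test_path_py_alt (path : String) : Bool :=
  pyBChecks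
    ('/' :: pyRstripSlash (PySem.Chars.lower (PySem.Chars.replace path.toList "\\".toList "/".toList)) ++ ['/'])

-- ===== PRECONDITION & SPEC =====
def Spec_is_test_path_py (path : String) (out : Bool) : Prop := out = is_test_path_py_alt path
instance (path : String) (out : Bool) : Decidable (Spec_is_test_path_py path out) := by unfold Spec_is_test_path_py; infer_instance

-- ===== CLAIM (what is proved, stated in full; the proofs are below) =====
def Claim_equal_is_test_path_py : Prop := ∀ (path : String), Dom_is_test_path_py path → Spec_is_test_path_py path (is_test_path_py path)

-- ===== LEMMAS AND PROOFS =====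
def split1 : List Char → List (List Char)
  | [] => [[]]
  | c :: t =>
    if c = '/' then [] :: split1 t
    else match split1 t with
      | [] => [[c]]
      | h :: r => (c :: h) :: r
lemma split1_ne_nil (s : List Char) : split1 s ≠ [] := by
  cases s with
  | nil => simp [split1]
  | cons c t =>
    simp only [split1]
    split_ifs
    · simp
    · rcases h : split1 t with _ | ⟨a, b⟩ <;> simp

lemma go_step (fuel : Nat) (c : Char) (t cur : List Char) (accs : List (List Char)) :
    PySem.Chars.splitOn.go ['/'] (fuel+1) (c::t) cur accs =
      (if c = '/' then PySem.Chars.splitOn.go ['/'] fuel t [] (cur.reverse :: accs)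
       else PySem.Chars.splitOn.go ['/'] fuel t (c :: cur) accs) := by
  rw [PySem.Chars.splitOn.go.eq_def]
  simp only [List.isPrefixOf, Bool.and_true, List.length_cons, List.length_nil,
    List.drop_succ_cons, List.drop_zero]
  by_cases hc : c = '/'
  · simp [hc]
  · simp only [hc, if_false, beq_iff_eq, if_neg (fun h => hc (Eq.symm h))]

lemma splitOn_go_eq (fuel : Nat) :
    ∀ (l cur : List Char) (accs : List (List Char)), l.length < fuel →
      PySem.Chars.splitOn.go ['/'] fuel l cur accs =
        accs.reverse ++ (match split1 l with
          | [] => [cur.reverse]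
          | h :: r => (cur.reverse ++ h) :: r) := by
  induction fuel with
  | zero => intro l cur accs h; omega
  | succ fuel ih =>
    intro l cur accs h
    cases l with
    | nil =>
      rw [PySem.Chars.splitOn.go.eq_def]
      simp [split1]
    | cons c t =>
      rw [go_step]
      simp only [List.length_cons] at h
      by_cases hc : c = '/'
      · rw [if_pos hc, ih t [] (cur.reverse :: accs) (by omega)]
        subst hc
        rcases hs : split1 t with _ | ⟨a, b⟩
        · exact absurd hs (split1_ne_nil t)
        · simp [split1, hs]
      · rw [if_neg hc, ih t (c :: cur) accs (by omega)]
        rcases hs : split1 t with _ | ⟨a, b⟩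
        · exact absurd hs (split1_ne_nil t)
        · simp [split1, hs, hc]

lemma splitOn_eq_split1 (s : List Char) :
    PySem.Chars.splitOn s "/".toList = split1 s := by
  have hsep : "/".toList = ['/'] := rfl
  rw [hsep]
  show PySem.Chars.splitOn.go ['/'] (s.length + 1) s [] [] = split1 s
  rw [splitOn_go_eq (s.length + 1) s [] [] (by omega)]
  rcases hs : split1 s with _ | ⟨a, b⟩
  · exact absurd hs (split1_ne_nil s)
  · simp

def segJoin (ps : List (List Char)) : List Char := ps.flatMap (fun p => '/' :: p) ++ ['/']
lemma segJoin_nil : segJoin [] = ['/'] := rfl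
lemma segJoin_cons (p : List Char) (ps : List (List Char)) :
    segJoin (p :: ps) = '/' :: (p ++ segJoin ps) := by
  simp [segJoin]

lemma split1_slashfree (s : List Char) : ∀ p ∈ split1 s, '/' ∉ p := by
  induction s with
  | nil => simp [split1]
  | cons c t ih =>
    simp only [split1]
    split_ifs with hc
    · simpa using ih
    · rcases hs : split1 t with _ | ⟨a, b⟩
      · exact absurd hs (split1_ne_nil t)
      · rw [hs] at ih
        simp only [List.mem_cons] at ih ⊢
        rintro p (rfl | hp)
        · simp only [List.mem_cons]
          rintro (rfl | hm)
          · exact hc rfl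
          · exact ih a (Or.inl rfl) hm
        · exact ih p (Or.inr hp)

lemma segJoin_split1 (s : List Char) : segJoin (split1 s) = '/' :: s ++ ['/'] := by
  induction s with
  | nil => simp [split1, segJoin]
  | cons c t ih =>
    simp only [split1]
    split_ifs with hc
    · subst hc; rw [segJoin_cons]; simp [ih]
    · rcases hs : split1 t with _ | ⟨a, b⟩
      · exact absurd hs (split1_ne_nil t)
      · rw [hs, segJoin_cons] at ih
        rw [segJoin_cons]
        simp only [List.cons_append, List.cons.injEq, true_and] at ih ⊢
        simp [ih]

lemma slash_split_unique : ∀ {w p a b : List Char}, '/' ∉ w → '/' ∉ p →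
    w ++ '/' :: a = p ++ '/' :: b → w = p ∧ a = b := by
  intro w
  induction w with
  | nil =>
    intro p a b _ hp h
    cases p with
    | nil => simpa using h
    | cons d p' =>
      simp only [List.nil_append, List.cons_append, List.cons.injEq] at h
      obtain ⟨h1, -⟩ := h
      subst h1
      simp at hp
  | cons c w' ih =>
    intro p a b hw hp h
    cases p with
    | nil =>
      simp only [List.cons_append, List.nil_append, List.cons.injEq] at h
      obtain ⟨h1, -⟩ := h
      subst h1
      simp at hw
    | cons d p' =>
      simp only [List.cons_append, List.cons.injEq] at h
      obtain ⟨rfl, h2⟩ := h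
      obtain ⟨h3, h4⟩ := ih (fun hm => hw (List.mem_cons_of_mem _ hm)) (fun hm => hp (List.mem_cons_of_mem _ hm)) h2
      exact ⟨by rw [h3], h4⟩

lemma slashfree_prefix : ∀ {a : List Char} {p y t : List Char}, '/' ∉ a →
    a ++ y = p ++ '/' :: t → a <+: p := by
  intro a
  induction a with
  | nil => intro p y t _ _; exact List.nil_prefix
  | cons c a' ih =>
    intro p y t ha h
    cases p with
    | nil =>
      simp only [List.cons_append, List.nil_append, List.cons.injEq] at h
      obtain ⟨h1, -⟩ := h
      subst h1
      simp at ha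
    | cons d p' =>
      simp only [List.cons_append, List.cons.injEq] at h
      obtain ⟨rfl, h2⟩ := h
      exact List.cons_prefix_cons.mpr ⟨rfl, ih (fun hm => ha (List.mem_cons_of_mem _ hm)) h2⟩

lemma peel : ∀ {p : List Char} {x t r : List Char}, '/' ∉ p →
    x ++ '/' :: t = p ++ r → ∃ x', x = p ++ x' ∧ x' ++ '/' :: t = r := by
  intro p
  induction p with
  | nil => intro x t r _ h; exact ⟨x, rfl, h⟩
  | cons c p' ih =>
    intro x t r hp h
    cases x with
    | nil =>
      simp only [List.nil_append, List.cons_append, List.cons.injEq] at h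
      obtain ⟨h1, -⟩ := h
      subst h1
      simp at hp
    | cons b x' =>
      simp only [List.cons_append, List.cons.injEq] at h
      obtain ⟨rfl, h2⟩ := h
      obtain ⟨x'', hx, hr⟩ := ih (fun hm => hp (List.mem_cons_of_mem _ hm)) h2
      exact ⟨x'', by rw [hx, List.cons_append], hr⟩

lemma segJoin_head (ps : List (List Char)) : ∃ t, segJoin ps = '/' :: t := by
  cases ps with
  | nil => exact ⟨[], rfl⟩
  | cons p r => exact ⟨p ++ segJoin r, segJoin_cons p r⟩

lemma segJoin_reverse_aux (l : List (List Char)) :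
    '/' :: l.flatMap (fun p => p.reverse ++ ['/']) = l.flatMap (fun p => '/' :: p.reverse) ++ ['/'] := by
  induction l with
  | nil => simp
  | cons a l ih => simp [ih]

lemma segJoin_reverse (ps : List (List Char)) :
    (segJoin ps).reverse = segJoin (ps.reverse.map List.reverse) := by
  simp only [segJoin, List.reverse_append, List.reverse_cons, List.reverse_nil, List.nil_append,
    List.reverse_flatMap, List.flatMap_map, Function.comp_def, List.singleton_append]
  exact segJoin_reverse_aux ps.reverse

lemma mem_infix {w : List Char} (hw : '/' ∉ w) :
    ∀ (ps : List (List Char)), (∀ q ∈ ps, '/' ∉ q) →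
      (('/' :: w ++ ['/']) <:+: segJoin ps ↔ w ∈ ps) := by
  intro ps
  induction ps with
  | nil =>
    intro _
    simp only [segJoin_nil, List.not_mem_nil, iff_false]
    intro h
    have := h.length_le
    simp at this
  | cons p rest ih =>
    intro hps
    have hp : '/' ∉ p := hps p List.mem_cons_self
    have hrest : ∀ q ∈ rest, '/' ∉ q := fun q hq => hps q (List.mem_cons_of_mem _ hq)
    constructor
    · rintro ⟨x, y, hxy⟩
      rw [segJoin_cons] at hxy
      cases x with
      | nil =>
        simp only [List.nil_append, List.cons_append, List.cons.injEq, true_and] at hxy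
        obtain ⟨t, ht⟩ := segJoin_head rest
        rw [ht] at hxy
        have h2 : w ++ '/' :: y = p ++ '/' :: t := by simpa using hxy
        rw [(slash_split_unique hw hp h2).1]
        exact List.mem_cons_self
      | cons c x' =>
        simp only [List.cons_append, List.cons.injEq] at hxy
        obtain ⟨-, hxy⟩ := hxy
        have hxy' : x' ++ '/' :: (w ++ '/' :: y) = p ++ segJoin rest := by
          simpa using hxy
        obtain ⟨x'', -, hr⟩ := peel hp hxy'
        have : ('/' :: w ++ ['/']) <:+: segJoin rest :=
          ⟨x'', y, by simpa using hr⟩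
        exact List.mem_cons_of_mem _ ((ih hrest).1 this)
    · intro hmem
      rcases List.mem_cons.mp hmem with rfl | hmem
      · obtain ⟨t, ht⟩ := segJoin_head rest
        refine ⟨[], t, ?_⟩
        rw [segJoin_cons, ht]
        simp
      · have := (ih hrest).2 hmem
        refine this.trans (List.IsSuffix.isInfix ?_)
        rw [segJoin_cons]
        exact ⟨'/' :: p, rfl⟩

lemma pre_infix {a : List Char} (ha : '/' ∉ a) (hne : a ≠ []) :
    ∀ (ps : List (List Char)), (∀ q ∈ ps, '/' ∉ q) →
      (('/' :: a) <:+: segJoin ps ↔ ∃ p ∈ ps, a <+: p) := by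
  intro ps
  induction ps with
  | nil =>
    intro _
    simp only [segJoin_nil, List.not_mem_nil, false_and, exists_false, iff_false]
    intro h
    have := h.length_le
    have : a.length = 0 := by simpa using this
    exact hne (List.eq_nil_of_length_eq_zero this)
  | cons p rest ih =>
    intro hps
    have hp : '/' ∉ p := hps p List.mem_cons_self
    have hrest : ∀ q ∈ rest, '/' ∉ q := fun q hq => hps q (List.mem_cons_of_mem _ hq)
    constructor
    · rintro ⟨x, y, hxy⟩
      rw [segJoin_cons] at hxy
      cases x with
      | nil =>
        simp only [List.nil_append, List.cons_append, List.cons.injEq, true_and] at hxy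
        obtain ⟨t, ht⟩ := segJoin_head rest
        rw [ht] at hxy
        exact ⟨p, List.mem_cons_self, slashfree_prefix ha hxy⟩
      | cons c x' =>
        simp only [List.cons_append, List.cons.injEq] at hxy
        obtain ⟨-, hxy⟩ := hxy
        have hxy' : x' ++ '/' :: (a ++ y) = p ++ segJoin rest := by simpa using hxy
        obtain ⟨x'', -, hr⟩ := peel hp hxy'
        have : ('/' :: a) <:+: segJoin rest := ⟨x'', y, by simpa using hr⟩
        obtain ⟨p', hp', hpre⟩ := (ih hrest).1 this
        exact ⟨p', List.mem_cons_of_mem _ hp', hpre⟩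
    · rintro ⟨p', hp', hpre⟩
      rcases List.mem_cons.mp hp' with rfl | hmem
      · refine List.IsPrefix.isInfix ?_
        rw [segJoin_cons]
        exact (List.cons_prefix_cons.mpr ⟨rfl, hpre.trans (List.prefix_append _ _)⟩)
      · have := (ih hrest).2 ⟨p', hmem, hpre⟩
        refine this.trans (List.IsSuffix.isInfix ?_)
        rw [segJoin_cons]
        exact ⟨'/' :: p, rfl⟩

lemma suf_infix {a : List Char} (ha : '/' ∉ a) (hne : a ≠ [])
    (ps : List (List Char)) (hps : ∀ q ∈ ps, '/' ∉ q) :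
    ((a ++ ['/']) <:+: segJoin ps ↔ ∃ p ∈ ps, a <:+ p) := by
  rw [← List.reverse_infix]
  have h1 : (a ++ ['/']).reverse = '/' :: a.reverse := by simp
  rw [h1, segJoin_reverse]
  rw [pre_infix (by simpa using ha) (by simpa using hne) _
    (by intro q hq; simp only [List.mem_map, List.mem_reverse] at hq
        obtain ⟨p, hp, rfl⟩ := hq
        simpa using hps p hp)]
  constructor
  · rintro ⟨p', hp', hpre⟩
    simp only [List.mem_map, List.mem_reverse] at hp'
    obtain ⟨p, hp, rfl⟩ := hp'
    exact ⟨p, hp, List.reverse_prefix.mp hpre⟩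
  · rintro ⟨p, hp, hsuf⟩
    refine ⟨p.reverse, ?_, List.reverse_prefix.mpr hsuf⟩
    simp only [List.mem_map, List.mem_reverse]
    exact ⟨p, hp, rfl⟩

lemma head_prefix {a : List Char} (ha : '/' ∉ a) (p : List Char) (ps : List (List Char)) :
    (('/' :: a) <+: segJoin (p :: ps) ↔ a <+: p) := by
  rw [segJoin_cons, List.cons_prefix_cons]
  simp only [true_and]
  constructor
  · rintro ⟨y, hy⟩
    obtain ⟨t, ht⟩ := segJoin_head ps
    rw [ht] at hy
    exact slashfree_prefix ha hy
  · intro h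
    exact h.trans (List.prefix_append _ _)

lemma head_exact {w p : List Char} (hw : '/' ∉ w) (hp : '/' ∉ p) (ps : List (List Char)) :
    (('/' :: w ++ ['/']) <+: segJoin (p :: ps) ↔ w = p) := by
  rw [segJoin_cons]
  constructor
  · rintro ⟨y, hy⟩
    obtain ⟨t, ht⟩ := segJoin_head ps
    rw [ht] at hy
    have : w ++ '/' :: y = p ++ '/' :: t := by simpa using hy
    exact (slash_split_unique hw hp this).1
  · rintro rfl
    obtain ⟨t, ht⟩ := segJoin_head ps
    rw [ht]
    exact ⟨t, by simp⟩

lemma last_suffix {a : List Char} (ha : '/' ∉ a) (qs : List (List Char)) (q : List Char) :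
    ((a ++ ['/']) <:+ segJoin (qs ++ [q]) ↔ a <:+ q) := by
  rw [← List.reverse_prefix, segJoin_reverse]
  have h1 : (a ++ ['/']).reverse = '/' :: a.reverse := by simp
  have h2 : (qs ++ [q]).reverse.map List.reverse = q.reverse :: qs.reverse.map List.reverse := by simp
  rw [h1, h2, head_prefix (by simpa using ha)]
  exact List.reverse_prefix

lemma last_exact {w q : List Char} (hw : '/' ∉ w) (hq : '/' ∉ q) (qs : List (List Char)) :
    (('/' :: w ++ ['/']) <:+ segJoin (qs ++ [q]) ↔ w = q) := by
  rw [← List.reverse_prefix, segJoin_reverse]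
  have h1 : ('/' :: w ++ ['/']).reverse = '/' :: w.reverse ++ ['/'] := by simp
  have h2 : (qs ++ [q]).reverse.map List.reverse = q.reverse :: qs.reverse.map List.reverse := by simp
  rw [h1, h2, head_exact (by simpa using hw) (by simpa using hq)]
  constructor
  · intro h; simpa using congrArg List.reverse h
  · rintro rfl; rfl

lemma loop_iff (parts : List (List Char)) :
    is_test_path_loop parts = true ↔
      ∃ p ∈ parts, (p = "tests".toList ∨ p = "test".toList ∨ p = "testing".toList) ∨
        "test_".toList <+: p ∨ "_test".toList <:+ p := by
  induction parts with
  | nil => simp [is_test_path_loop]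
  | cons part rest ih =>
    simp only [is_test_path_loop]
    split_ifs with h1 h2
    · simp only [true_iff]
      exact ⟨part, List.mem_cons_self, Or.inl h1⟩
    · simp only [true_iff]
      rcases Bool.or_eq_true _ _ |>.mp h2 with h | h
      · exact ⟨part, List.mem_cons_self, Or.inr (Or.inl ((PySem.Chars.startswith_iff _ _).mp h))⟩
      · exact ⟨part, List.mem_cons_self, Or.inr (Or.inr ((PySem.Chars.endswith_iff _ _).mp h))⟩
    · rw [ih]
      constructor
      · rintro ⟨p, hp, hd⟩
        exact ⟨p, List.mem_cons_of_mem _ hp, hd⟩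
      · rintro ⟨p, hp, hd⟩
        rcases List.mem_cons.mp hp with rfl | hp'
        · rcases hd with hd | hd | hd
          · exact absurd hd h1
          · exact absurd (Bool.or_eq_true _ _ |>.mpr (Or.inl ((PySem.Chars.startswith_iff _ _).mpr hd))) h2
          · exact absurd (Bool.or_eq_true _ _ |>.mpr (Or.inr ((PySem.Chars.endswith_iff _ _).mpr hd))) h2
        · exact ⟨p, hp', hd⟩

lemma core_eq (qs : List (List Char)) (q : List Char) (hps : ∀ p ∈ qs ++ [q], '/' ∉ p) :
    pyATest (qs ++ [q]) = pyBChecks (segJoin (qs ++ [q])) := by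
  have hq : '/' ∉ q := hps q (by simp)
  have hT1 := mem_infix (w := "tests".toList) (by decide) _ hps
  have hT2 := mem_infix (w := "test".toList) (by decide) _ hps
  have hT3 := mem_infix (w := "testing".toList) (by decide) _ hps
  have hP := pre_infix (a := "test_".toList) (by decide) (by decide) _ hps
  have hS := suf_infix (a := "_test".toList) (by decide) (by decide) _ hps
  have hE1 := last_suffix (a := "_test.py".toList) (by decide) qs q
  have hE2 := last_exact (w := "conftest.py".toList) (by decide) hq qs
  -- Bool-level bridges for B's five pattern tests
  have bT1 : PySem.Chars.isIn "/tests/".toList (segJoin (qs ++ [q])) = true ↔ "tests".toList ∈ qs ++ [q] := by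
    rw [PySem.Chars.isIn_iff_infix]; exact hT1
  have bT2 : PySem.Chars.isIn "/test/".toList (segJoin (qs ++ [q])) = true ↔ "test".toList ∈ qs ++ [q] := by
    rw [PySem.Chars.isIn_iff_infix]; exact hT2
  have bT3 : PySem.Chars.isIn "/testing/".toList (segJoin (qs ++ [q])) = true ↔ "testing".toList ∈ qs ++ [q] := by
    rw [PySem.Chars.isIn_iff_infix]; exact hT3
  have bP : PySem.Chars.isIn "/test_".toList (segJoin (qs ++ [q])) = true ↔ ∃ p ∈ qs ++ [q], "test_".toList <+: p := by
    rw [PySem.Chars.isIn_iff_infix]; exact hP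
  have bS : PySem.Chars.isIn "_test/".toList (segJoin (qs ++ [q])) = true ↔ ∃ p ∈ qs ++ [q], "_test".toList <:+ p := by
    rw [PySem.Chars.isIn_iff_infix]; exact hS
  have bE1 : PySem.Chars.endswith (segJoin (qs ++ [q])) "_test.py/".toList = true ↔ "_test.py".toList <:+ q := by
    rw [PySem.Chars.endswith_iff]; exact hE1
  have bE2 : PySem.Chars.endswith (segJoin (qs ++ [q])) "/conftest.py/".toList = true ↔ "conftest.py".toList = q := by
    rw [PySem.Chars.endswith_iff]; exact hE2
  have hA : pyATest (qs ++ [q]) = true ↔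
      ((∃ p ∈ qs ++ [q], (p = "tests".toList ∨ p = "test".toList ∨ p = "testing".toList) ∨
          "test_".toList <+: p ∨ "_test".toList <:+ p) ∨
        "test_".toList <+: q ∨ "_test.py".toList <:+ q ∨ q = "conftest.py".toList) := by
    simp only [pyATest, List.getLast?_concat]
    split_ifs with h1 h2 h3
    · exact iff_of_true rfl (Or.inl ((loop_iff _).mp h1))
    · refine iff_of_true rfl ?_
      rcases (Bool.or_eq_true _ _).mp h2 with h | h
      · exact Or.inr (Or.inl ((PySem.Chars.startswith_iff _ _).mp h))
      · exact Or.inr (Or.inr (Or.inl ((PySem.Chars.endswith_iff _ _).mp h)))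
    · exact iff_of_true rfl (Or.inr (Or.inr (Or.inr h3)))
    · refine iff_of_false (by simp) ?_
      rintro (hl | hpre | hsuf | heq)
      · exact h1 ((loop_iff _).mpr hl)
      · exact h2 ((Bool.or_eq_true _ _).mpr (Or.inl ((PySem.Chars.startswith_iff _ _).mpr hpre)))
      · exact h2 ((Bool.or_eq_true _ _).mpr (Or.inr ((PySem.Chars.endswith_iff _ _).mpr hsuf)))
      · exact h3 heq
  have hB : pyBChecks (segJoin (qs ++ [q])) = true ↔
      (("tests".toList ∈ qs ++ [q] ∨ "test".toList ∈ qs ++ [q] ∨ "testing".toList ∈ qs ++ [q]) ∨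
        ((∃ p ∈ qs ++ [q], "test_".toList <+: p) ∨ (∃ p ∈ qs ++ [q], "_test".toList <:+ p)) ∨
        ("_test.py".toList <:+ q ∨ "conftest.py".toList = q)) := by
    simp only [pyBChecks]
    split_ifs with g1 g2
    · refine iff_of_true rfl ?_
      rcases (Bool.or_eq_true _ _).mp g1 with g | g
      · rcases (Bool.or_eq_true _ _).mp g with g' | g'
        · exact Or.inl (Or.inl (bT1.mp g'))
        · exact Or.inl (Or.inr (Or.inl (bT2.mp g')))
      · exact Or.inl (Or.inr (Or.inr (bT3.mp g)))
    · refine iff_of_true rfl ?_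
      rcases (Bool.or_eq_true _ _).mp g2 with g | g
      · exact Or.inr (Or.inl (Or.inl (bP.mp g)))
      · exact Or.inr (Or.inl (Or.inr (bS.mp g)))
    · rw [Bool.or_eq_true, bE1, bE2]
      constructor
      · rintro (h | h)
        · exact Or.inr (Or.inr (Or.inl h))
        · exact Or.inr (Or.inr (Or.inr h))
      · rintro ((h | h | h) | (h | h) | (h | h))
        · exact absurd ((Bool.or_eq_true _ _).mpr (Or.inl ((Bool.or_eq_true _ _).mpr (Or.inl (bT1.mpr h))))) g1
        · exact absurd ((Bool.or_eq_true _ _).mpr (Or.inl ((Bool.or_eq_true _ _).mpr (Or.inr (bT2.mpr h))))) g1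
        · exact absurd ((Bool.or_eq_true _ _).mpr (Or.inr (bT3.mpr h))) g1
        · exact absurd ((Bool.or_eq_true _ _).mpr (Or.inl (bP.mpr h))) g2
        · exact absurd ((Bool.or_eq_true _ _).mpr (Or.inr (bS.mpr h))) g2
        · exact Or.inl h
        · exact Or.inr h
  rw [Bool.eq_iff_iff, hA, hB]
  have hqmem : q ∈ qs ++ [q] := by simp
  constructor
  · rintro (⟨p, hp, (rfl | rfl | rfl) | hpre | hsuf⟩ | hpre | hsuf | rfl)
    · exact Or.inl (Or.inl hp)
    · exact Or.inl (Or.inr (Or.inl hp))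
    · exact Or.inl (Or.inr (Or.inr hp))
    · exact Or.inr (Or.inl (Or.inl ⟨p, hp, hpre⟩))
    · exact Or.inr (Or.inl (Or.inr ⟨p, hp, hsuf⟩))
    · exact Or.inr (Or.inl (Or.inl ⟨q, hqmem, hpre⟩))
    · exact Or.inr (Or.inr (Or.inl hsuf))
    · exact Or.inr (Or.inr (Or.inr rfl))
  · rintro ((h | h | h) | (⟨p, hp, hpre⟩ | ⟨p, hp, hsuf⟩) | (h | h))
    · exact Or.inl ⟨_, h, Or.inl (Or.inl rfl)⟩
    · exact Or.inl ⟨_, h, Or.inl (Or.inr (Or.inl rfl))⟩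
    · exact Or.inl ⟨_, h, Or.inl (Or.inr (Or.inr rfl))⟩
    · exact Or.inl ⟨p, hp, Or.inr (Or.inl hpre)⟩
    · exact Or.inl ⟨p, hp, Or.inr (Or.inr hsuf)⟩
    · exact Or.inr (Or.inr (Or.inl h))
    · exact Or.inr (Or.inr (Or.inr h.symm))

-- ===== VERDICT (by name: the statement is the Claim_ definition above) =====
theorem is_test_path_py_spec : Claim_equal_is_test_path_py := by
  intro path _
  show is_test_path_py path = is_test_path_py_alt path
  unfold is_test_path_py is_test_path_py_alt
  generalize pyRstripSlash (PySem.Chars.lower (PySem.Chars.replace path.toList "\\".toList "/".toList)) = n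
  rw [splitOn_eq_split1, show ('/' :: n ++ ['/']) = segJoin (split1 n) from (segJoin_split1 n).symm]
  obtain h | ⟨qs, q, hc⟩ := (split1 n).eq_nil_or_concat
  · exact absurd h (split1_ne_nil n)
  · rw [List.concat_eq_append] at hc
    rw [hc]
    exact core_eq qs q (hc ▸ split1_slashfree n)
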